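-- pv_equiv track=rewrite | github.com/valthalion/aoc2020 | puzzle11.py | build_neighbours_dict
-- ===== SOURCE A (Python) =====
-- from collections import defaultdict
--
-- def build_neighbours_dict(seats, floor_is_neighbour):
--     directions = ((0, 1), (0, -1), (1, 0), (-1, 0), (1, 1), (-1, -1), (1, -1), (-1, 1))
--     nrows, ncols = len(seats), len(seats[0])
--     neighbours = defaultdict(set)
--     for row in range(nrows):
--         for col in range(ncols):
--             if seats[row][col] == '.':
--                 continue
--             for dr, dc in directions:
--                 steps = 0
--                 r, c = row, col
--                 while steps < 1 or not floor_is_neighbour: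
--                     steps += 1
--                     r += dr
--                     c += dc
--                     if not (0 <= r < nrows and 0 <= c < ncols):
--                         break
--                     if seats[r][c] == '.':
--                         continue
--                     neighbours[(r, c)].add((row, col))
--                     break
--     return neighbours
-- ===== SOURCE B (Python) =====
-- def build_neighbours_dict(seats, floor_is_neighbour):
--     # DP: one sweep per direction computes every cell's first visible seat from
--     # the already-swept adjacent cell; then a flat event list builds the dict.
--     directions = ((0, 1), (0, -1), (1, 0), (-1, 0), (1, 1), (-1, -1), (1, -1), (-1, 1))
--     nrows, ncols = len(seats), len(seats[0])
--
--     def sweep(dr, dc):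
--         table = {}
--         rows = range(nrows - 1, -1, -1) if dr == 1 else range(nrows)
--         cols = range(ncols - 1, -1, -1) if dc == 1 else range(ncols)
--         for row in rows:
--             for col in cols:
--                 r, c = row + dr, col + dc
--                 if not (0 <= r < nrows and 0 <= c < ncols):
--                     table[(row, col)] = None
--                 elif seats[r][c] != '.':
--                     table[(row, col)] = (r, c)
--                 elif floor_is_neighbour:
--                     table[(row, col)] = None
--                 else:
--                     table[(row, col)] = table[(r, c)]
--         return table
--
--     tables = [sweep(dr, dc) for dr, dc in directions]
--     events = [(t[(row, col)], (row, col))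
--               for row in range(nrows) for col in range(ncols)
--               if seats[row][col] != '.'
--               for t in tables
--               if t[(row, col)] is not None]
--     neighbours = {}
--     for tgt, src in events:
--         neighbours.setdefault(tgt, set()).add(src)
--     return neighbours
-- ===== Notes on version B (the rewrite author's own statement) =====
-- stated objective: alternative
-- what changed: A walks a ray cell-by-cell from every seat in each of the 8 directions until it hits a seat or the border; B does dynamic programming instead: one sweep per direction fills a table of each cell's first visible seat from the already-computed entry of the adjacent cell, then a flat (target, source) event list is folded into the dictionary; on the dense benchmark grids this is not measurably faster (A's rays stop after one step there), so no speed is claimed.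
import Mathlib
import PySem

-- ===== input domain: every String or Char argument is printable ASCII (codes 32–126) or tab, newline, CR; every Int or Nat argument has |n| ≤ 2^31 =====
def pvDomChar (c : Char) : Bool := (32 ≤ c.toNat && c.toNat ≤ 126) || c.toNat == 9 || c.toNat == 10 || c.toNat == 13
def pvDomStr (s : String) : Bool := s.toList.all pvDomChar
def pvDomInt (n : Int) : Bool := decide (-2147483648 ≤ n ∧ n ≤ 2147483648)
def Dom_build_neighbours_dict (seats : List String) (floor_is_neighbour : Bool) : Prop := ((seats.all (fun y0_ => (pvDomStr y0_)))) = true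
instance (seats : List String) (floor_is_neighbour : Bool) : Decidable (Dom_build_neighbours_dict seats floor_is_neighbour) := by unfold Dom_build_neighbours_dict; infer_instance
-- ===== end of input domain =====

-- B replaces A's per-seat per-direction ray walk by dynamic programming: one sweep
-- per direction fills a first-visible-seat table from the adjacent cell's entry,
-- and a flat (target, source) event list is then folded into the dictionary.

-- ===== PORT A =====

-- seats[r][c]; both programs read it only after an explicit range check
def pvCell (seats : List String) (r c : Int) : Char :=
  (PySem.Str.pyGet? (PySem.List.pyGetD seats r "") c).getD '.'

def pvDirs : List (Int × Int) :=
  [(0, 1), (0, -1), (1, 0), (-1, 0), (1, 1), (-1, -1), (1, -1), (-1, 1)]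

-- A's while loop for one start cell and one direction: returns the key that gets
-- `(row, col)` added, if any.  Fuel only makes the recursion structural: the loop
-- leaves the grid within nrows+ncols steps, so the fuel A's port passes never runs out.
def pvScanA (seats : List String) (floor_is_neighbour : Bool) (nrows ncols dr dc : Int) :
    Nat → Int → Int → Option (Int × Int)
  | 0, _, _ => none
  | fuel + 1, row, col =>
    let r := row + dr
    let c := col + dc
    if 0 ≤ r ∧ r < nrows ∧ 0 ≤ c ∧ c < ncols then
      if pvCell seats r c = '.' then
        if floor_is_neighbour then none
        else pvScanA seats floor_is_neighbour nrows ncols dr dc fuel r c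
      else some (r, c)
    else none

def build_neighbours_dict (seats : List String) (floor_is_neighbour : Bool) :
    List (Int × Int × List (Int × Int)) :=
  let nrows : Int := (seats.length : Int)
  let ncols : Int := PySem.Str.len (PySem.List.pyGetD seats 0 "")  -- len(seats[0]); Pre_ excludes seats = []
  let fuel : Nat := (nrows + ncols).toNat + 1
  let d : PySem.Dict (Int × Int) (PySem.Set (Int × Int)) :=
    (PySem.List.pyRange 0 nrows 1).foldl (fun d row =>
      (PySem.List.pyRange 0 ncols 1).foldl (fun d col =>
        if pvCell seats row col = '.' then d
        else
          pvDirs.foldl (fun d dir =>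
            match pvScanA seats floor_is_neighbour nrows ncols dir.1 dir.2 fuel row col with
            | none => d
            -- neighbours[(r, c)].add((row, col)) on a defaultdict(set)
            | some k => d.modify k PySem.Set.empty (fun S => PySem.Set.add S (row, col))) d) d)
      PySem.Dict.empty
  d.items.map (fun p => (p.1.1, p.1.2, p.2))

-- ===== PORT B =====

-- sweep(dr, dc): cells are visited so that (row+dr, col+dc) is always already in
-- the table, and each cell's entry is written from that one (the DP step).
def pvSweep (seats : List String) (floor_is_neighbour : Bool) (nrows ncols dr dc : Int) :
    PySem.Dict (Int × Int) (Option (Int × Int)) :=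
  let rows := if dr = 1 then PySem.List.pyRange (nrows - 1) (-1) (-1) else PySem.List.pyRange 0 nrows 1
  let cols := if dc = 1 then PySem.List.pyRange (ncols - 1) (-1) (-1) else PySem.List.pyRange 0 ncols 1
  rows.foldl (fun t row =>
    cols.foldl (fun t col =>
      let r := row + dr
      let c := col + dc
      t.insert (row, col)
        (if ¬ (0 ≤ r ∧ r < nrows ∧ 0 ≤ c ∧ c < ncols) then none
         else if pvCell seats r c ≠ '.' then some (r, c)
         else if floor_is_neighbour then none
         else t.getD (r, c) none)) t) PySem.Dict.empty

def build_neighbours_dict_alt (seats : List String) (floor_is_neighbour : Bool) :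
    List (Int × Int × List (Int × Int)) :=
  let nrows : Int := (seats.length : Int)
  let ncols : Int := PySem.Str.len (PySem.List.pyGetD seats 0 "")
  -- tables = [sweep(dr, dc) for dr, dc in directions]
  let tables : List (PySem.Dict (Int × Int) (Option (Int × Int))) :=
    pvDirs.map (fun dir => pvSweep seats floor_is_neighbour nrows ncols dir.1 dir.2)
  -- events = [(t[(row,col)], (row,col)) for row … for col … if seat for t in tables if t[…] is not None]
  let events : List ((Int × Int) × (Int × Int)) :=
    (PySem.List.pyRange 0 nrows 1).flatMap (fun row =>
      (PySem.List.pyRange 0 ncols 1).flatMap (fun col =>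
        if pvCell seats row col = '.' then []
        else tables.filterMap (fun t =>
          (t.getD (row, col) none).map (fun tgt => (tgt, (row, col))))))
  -- for tgt, src in events: neighbours.setdefault(tgt, set()).add(src)
  let d : PySem.Dict (Int × Int) (PySem.Set (Int × Int)) :=
    events.foldl
      (fun d e => d.modify e.1 PySem.Set.empty (fun S => PySem.Set.add S e.2))
      PySem.Dict.empty
  d.items.map (fun p => (p.1.1, p.1.2, p.2))

-- ===== PRECONDITION & SPEC =====
-- Pre_ excludes exactly the inputs on which A raises IndexError: the empty list
-- (seats[0]) and grids with a row shorter than the first row (seats[row][col]).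
def Pre_build_neighbours_dict (seats : List String) (floor_is_neighbour : Bool) : Prop :=
  seats ≠ [] ∧ ∀ s ∈ seats, PySem.Str.len (seats.headD "") ≤ PySem.Str.len s
instance (seats : List String) (floor_is_neighbour : Bool) : Decidable (Pre_build_neighbours_dict seats floor_is_neighbour) := by unfold Pre_build_neighbours_dict; infer_instance

def pvWitness_build_neighbours_dict : List String × Bool := (["L.", ".L"], false)

def Spec_build_neighbours_dict (seats : List String) (floor_is_neighbour : Bool) (out : List (Int × Int × List (Int × Int))) : Prop := out = build_neighbours_dict_alt seats floor_is_neighbour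
instance (seats : List String) (floor_is_neighbour : Bool) (out : List (Int × Int × List (Int × Int))) : Decidable (Spec_build_neighbours_dict seats floor_is_neighbour out) := by unfold Spec_build_neighbours_dict; infer_instance

-- ===== CLAIM (what is proved, stated in full; the proofs are below) =====
def Claim_equal_build_neighbours_dict : Prop := ∀ (seats : List String) (floor_is_neighbour : Bool), Dom_build_neighbours_dict seats floor_is_neighbour → Pre_build_neighbours_dict seats floor_is_neighbour → Spec_build_neighbours_dict seats floor_is_neighbour (build_neighbours_dict seats floor_is_neighbour)

-- ===== LEMMAS AND PROOFS =====

-- Upper bound on the number of iterations of A's while loop started at (r, c).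
def pvBound (nrows ncols dr dc r c : Int) : Nat :=
  ((if dr = 1 then nrows - r else if dr = -1 then r + 1 else 0) +
   (if dc = 1 then ncols - c else if dc = -1 then c + 1 else 0)).toNat

lemma pvBound_pos (nrows ncols dr dc r c : Int)
    (hdr : dr = 1 ∨ dr = 0 ∨ dr = -1) (hdc : dc = 1 ∨ dc = 0 ∨ dc = -1)
    (hnz : ¬(dr = 0 ∧ dc = 0))
    (h : 0 ≤ r ∧ r < nrows ∧ 0 ≤ c ∧ c < ncols) :
    1 ≤ pvBound nrows ncols dr dc r c := by
  unfold pvBound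
  rcases hdr with h1 | h1 | h1 <;> rcases hdc with h2 | h2 | h2 <;> subst h1 <;> subst h2 <;>
    simp_all <;> omega

lemma pvBound_le (nrows ncols dr dc r c : Int)
    (hdr : dr = 1 ∨ dr = 0 ∨ dr = -1) (hdc : dc = 1 ∨ dc = 0 ∨ dc = -1)
    (h : 0 ≤ r ∧ r < nrows ∧ 0 ≤ c ∧ c < ncols) :
    pvBound nrows ncols dr dc r c ≤ (nrows + ncols).toNat := by
  unfold pvBound
  rcases hdr with h1 | h1 | h1 <;> rcases hdc with h2 | h2 | h2 <;> subst h1 <;> subst h2 <;>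
    simp_all <;> omega

lemma pvBound_step (nrows ncols dr dc r c : Int)
    (hdr : dr = 1 ∨ dr = 0 ∨ dr = -1) (hdc : dc = 1 ∨ dc = 0 ∨ dc = -1)
    (hnz : ¬(dr = 0 ∧ dc = 0))
    (h : 0 ≤ r ∧ r < nrows ∧ 0 ≤ c ∧ c < ncols)
    (h' : 0 ≤ r + dr ∧ r + dr < nrows ∧ 0 ≤ c + dc ∧ c + dc < ncols) :
    pvBound nrows ncols dr dc (r + dr) (c + dc) < pvBound nrows ncols dr dc r c := by
  unfold pvBound
  rcases hdr with h1 | h1 | h1 <;> rcases hdc with h2 | h2 | h2 <;> subst h1 <;> subst h2 <;>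
    simp_all <;> omega

-- Fuel irrelevance: any fuel at or above pvBound computes the loop's value.
lemma pvScanA_stable (seats : List String) (floor : Bool) (nrows ncols dr dc : Int)
    (hdr : dr = 1 ∨ dr = 0 ∨ dr = -1) (hdc : dc = 1 ∨ dc = 0 ∨ dc = -1)
    (hnz : ¬(dr = 0 ∧ dc = 0)) :
    ∀ n m row col, (0 ≤ row ∧ row < nrows ∧ 0 ≤ col ∧ col < ncols) →
      pvBound nrows ncols dr dc row col ≤ n → pvBound nrows ncols dr dc row col ≤ m →
      pvScanA seats floor nrows ncols dr dc n row col =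
        pvScanA seats floor nrows ncols dr dc m row col := by
  intro n
  induction n with
  | zero =>
    intro m row col hin hn _
    have := pvBound_pos nrows ncols dr dc row col hdr hdc hnz hin
    omega
  | succ n ih =>
    intro m row col hin hn hm
    have hpos := pvBound_pos nrows ncols dr dc row col hdr hdc hnz hin
    obtain ⟨m', rfl⟩ : ∃ m', m = m' + 1 := ⟨m - 1, by omega⟩
    simp only [pvScanA]
    by_cases hr : 0 ≤ row + dr ∧ row + dr < nrows ∧ 0 ≤ col + dc ∧ col + dc < ncols
    · simp only [hr]
      by_cases hc : pvCell seats (row + dr) (col + dc) = '.'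
      · simp only [hc]
        cases floor with
        | true => simp
        | false =>
          simp only [Bool.false_eq_true, if_false]
          have hstep := pvBound_step nrows ncols dr dc row col hdr hdc hnz hin hr
          exact ih m' (row + dr) (col + dc) hr (by omega) (by omega)
      · simp only [hc, if_false]
    · simp only [hr, if_false]

-- ===== the sweep computes exactly A's ray walk =====

-- iteration index of a row / column inside the sweep's traversal order
def pvRI (nrows dr r : Int) : Int := if dr = 1 then nrows - 1 - r else r
def pvCI (ncols dc c : Int) : Int := if dc = 1 then ncols - 1 - c else c

-- the sweep visits cells in strictly increasing lexicographic (pvRI, pvCI) order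
def pvLt (nrows ncols dr dc : Int) (a b : Int × Int) : Prop :=
  pvRI nrows dr a.1 < pvRI nrows dr b.1 ∨
    (pvRI nrows dr a.1 = pvRI nrows dr b.1 ∧ pvCI ncols dc a.2 < pvCI ncols dc b.2)

def pvCells (nrows ncols dr dc : Int) : List (Int × Int) :=
  (if dr = 1 then PySem.List.pyRange (nrows - 1) (-1) (-1) else PySem.List.pyRange 0 nrows 1).flatMap
    (fun row => (if dc = 1 then PySem.List.pyRange (ncols - 1) (-1) (-1) else PySem.List.pyRange 0 ncols 1).map
      (fun col => (row, col)))

lemma pvCells_mem (nrows ncols dr dc : Int) (x : Int × Int) :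
    x ∈ pvCells nrows ncols dr dc ↔ (0 ≤ x.1 ∧ x.1 < nrows ∧ 0 ≤ x.2 ∧ x.2 < ncols) := by
  unfold pvCells
  simp only [List.mem_flatMap, List.mem_map]
  constructor
  · rintro ⟨row, hrow, col, hcol, rfl⟩
    constructor <;> [skip; constructor] <;> try constructor
    all_goals
      split at hrow <;> split at hcol <;>
        simp only [PySem.List.mem_pyRange_neg_one, PySem.List.mem_pyRange_one] at hrow hcol <;>
        omega
  · rintro ⟨h1, h2, h3, h4⟩
    refine ⟨x.1, ?_, x.2, ?_, rfl⟩
    · split <;> simp only [PySem.List.mem_pyRange_neg_one, PySem.List.mem_pyRange_one] <;> omega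
    · split <;> simp only [PySem.List.mem_pyRange_neg_one, PySem.List.mem_pyRange_one] <;> omega

lemma pvRows_pairwise (nrows dr : Int) :
    (if dr = 1 then PySem.List.pyRange (nrows - 1) (-1) (-1) else PySem.List.pyRange 0 nrows 1).Pairwise
      (fun a b => pvRI nrows dr a < pvRI nrows dr b) := by
  by_cases h : dr = 1
  · rw [if_pos h, PySem.List.pyRange_neg_one_eq_reverse, List.pairwise_reverse]
    refine (PySem.List.pairwise_lt_pyRange_one _ _).imp ?_
    intro a b hab; simp [pvRI, h]; omega
  · rw [if_neg h]
    refine (PySem.List.pairwise_lt_pyRange_one _ _).imp ?_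
    intro a b hab; simpa [pvRI, h] using hab

lemma pvCols_pairwise (ncols dc : Int) :
    (if dc = 1 then PySem.List.pyRange (ncols - 1) (-1) (-1) else PySem.List.pyRange 0 ncols 1).Pairwise
      (fun a b => pvCI ncols dc a < pvCI ncols dc b) := by
  by_cases h : dc = 1
  · rw [if_pos h, PySem.List.pyRange_neg_one_eq_reverse, List.pairwise_reverse]
    refine (PySem.List.pairwise_lt_pyRange_one _ _).imp ?_
    intro a b hab; simp [pvCI, h]; omega
  · rw [if_neg h]
    refine (PySem.List.pairwise_lt_pyRange_one _ _).imp ?_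
    intro a b hab; simpa [pvCI, h] using hab

lemma pvCells_pairwise (nrows ncols dr dc : Int) :
    (pvCells nrows ncols dr dc).Pairwise (pvLt nrows ncols dr dc) := by
  unfold pvCells
  rw [List.pairwise_flatMap]
  constructor
  · intro row _
    rw [List.pairwise_map]
    refine (pvCols_pairwise ncols dc).imp ?_
    intro a b hab
    exact Or.inr ⟨rfl, hab⟩
  · refine (pvRows_pairwise nrows dr).imp ?_
    intro r1 r2 h12
    rintro x hx y hy
    simp only [List.mem_map] at hx hy
    obtain ⟨c1, _, rfl⟩ := hx
    obtain ⟨c2, _, rfl⟩ := hy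
    exact Or.inl h12

-- the sweep's loop body as a function of the visited cell
def pvG (seats : List String) (floor : Bool) (nrows ncols dr dc : Int)
    (t : PySem.Dict (Int × Int) (Option (Int × Int))) (x : Int × Int) :
    PySem.Dict (Int × Int) (Option (Int × Int)) :=
  t.insert x
    (if ¬ (0 ≤ x.1 + dr ∧ x.1 + dr < nrows ∧ 0 ≤ x.2 + dc ∧ x.2 + dc < ncols) then none
     else if pvCell seats (x.1 + dr) (x.2 + dc) ≠ '.' then some (x.1 + dr, x.2 + dc)
     else if floor then none
     else t.getD (x.1 + dr, x.2 + dc) none)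

lemma pvSweep_eq_foldl (seats : List String) (floor : Bool) (nrows ncols dr dc : Int) :
    pvSweep seats floor nrows ncols dr dc =
      (pvCells nrows ncols dr dc).foldl (pvG seats floor nrows ncols dr dc) PySem.Dict.empty := by
  unfold pvSweep pvCells
  simp only []
  rw [List.foldl_flatMap]
  apply PySem.List.foldl_congr_mem
  intro acc row _
  rw [List.foldl_map]
  rfl

lemma pvLt_asymm {nrows ncols dr dc : Int} {a b : Int × Int}
    (h1 : pvLt nrows ncols dr dc a b) (h2 : pvLt nrows ncols dr dc b a) : False := by
  unfold pvLt at h1 h2; rcases h1 with h1 | h1 <;> rcases h2 with h2 | h2 <;> omega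

lemma pvLt_ne {nrows ncols dr dc : Int} {a b : Int × Int}
    (h : pvLt nrows ncols dr dc a b) : a ≠ b := by
  rintro rfl; unfold pvLt at h; rcases h with h | h <;> omega

lemma pvLt_step (nrows ncols dr dc : Int)
    (hdr : dr = 1 ∨ dr = 0 ∨ dr = -1) (hdc : dc = 1 ∨ dc = 0 ∨ dc = -1)
    (hnz : ¬(dr = 0 ∧ dc = 0)) (x : Int × Int) :
    pvLt nrows ncols dr dc (x.1 + dr, x.2 + dc) x := by
  unfold pvLt pvRI pvCI
  rcases hdr with h1 | h1 | h1 <;> rcases hdc with h2 | h2 | h2 <;> subst h1 <;> subst h2 <;>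
    simp_all <;> omega

lemma pvFold_inv (seats : List String) (floor : Bool) (nrows ncols dr dc : Int)
    (hdr : dr = 1 ∨ dr = 0 ∨ dr = -1) (hdc : dc = 1 ∨ dc = 0 ∨ dc = -1)
    (hnz : ¬(dr = 0 ∧ dc = 0)) :
    ∀ (M P : List (Int × Int)) (t : PySem.Dict (Int × Int) (Option (Int × Int))),
      pvCells nrows ncols dr dc = P ++ M →
      (∀ y ∈ P, t.getD y none =
        pvScanA seats floor nrows ncols dr dc ((nrows + ncols).toNat + 1) y.1 y.2) →
      ∀ y ∈ P ++ M, (M.foldl (pvG seats floor nrows ncols dr dc) t).getD y none =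
        pvScanA seats floor nrows ncols dr dc ((nrows + ncols).toNat + 1) y.1 y.2 := by
  intro M
  induction M with
  | nil =>
    intro P t _ hinv y hy
    simpa using hinv y (by simpa using hy)
  | cons x M' ih =>
    intro P t hsplit hinv y hy
    have hpw := pvCells_pairwise nrows ncols dr dc
    rw [hsplit] at hpw
    have hPx : ∀ y ∈ P, pvLt nrows ncols dr dc y x := by
      intro y hyP
      exact (List.pairwise_append.mp hpw).2.2 y hyP x (by simp)
    have hxM' : ∀ z ∈ M', pvLt nrows ncols dr dc x z := by
      intro z hz
      exact (List.pairwise_cons.mp (List.pairwise_append.mp hpw).2.1).1 z hz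
    have hxmem : x ∈ pvCells nrows ncols dr dc := by rw [hsplit]; simp
    have hxg := (pvCells_mem nrows ncols dr dc x).mp hxmem
    -- the value written for x is A's scan value
    have hval : (pvG seats floor nrows ncols dr dc t x).getD x none =
        pvScanA seats floor nrows ncols dr dc ((nrows + ncols).toNat + 1) x.1 x.2 := by
      unfold pvG
      rw [PySem.Dict.getD_insert_self]
      simp only [pvScanA]
      by_cases hin : 0 ≤ x.1 + dr ∧ x.1 + dr < nrows ∧ 0 ≤ x.2 + dc ∧ x.2 + dc < ncols
      · by_cases hc : pvCell seats (x.1 + dr) (x.2 + dc) = '.'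
        · cases floor with
          | true => simp [hin, hc]
          | false =>
            simp only [hin, hc, and_self, not_true_eq_false, if_false, if_true, ne_eq,
              Bool.false_eq_true]
            -- x+d was already processed: it lies in P
            have hmem : (x.1 + dr, x.2 + dc) ∈ P := by
              have : (x.1 + dr, x.2 + dc) ∈ pvCells nrows ncols dr dc :=
                (pvCells_mem nrows ncols dr dc _).mpr (by simpa using hin)
              rw [hsplit] at this
              rcases List.mem_append.mp this with h | h
              · exact h
              · exfalso
                have hstep := pvLt_step nrows ncols dr dc hdr hdc hnz x
                rcases List.mem_cons.mp h with h | h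
                · exact pvLt_ne hstep h
                · exact pvLt_asymm hstep (hxM' _ h)
            rw [hinv _ hmem]
            exact (pvScanA_stable seats false nrows ncols dr dc hdr hdc hnz
              ((nrows + ncols).toNat + 1) ((nrows + ncols).toNat) (x.1 + dr) (x.2 + dc) hin
              (by have := pvBound_le nrows ncols dr dc (x.1 + dr) (x.2 + dc) hdr hdc hin; omega)
              (pvBound_le nrows ncols dr dc _ _ hdr hdc hin))
        · simp [hin, hc]
      · simp [hin]
    -- re-establish the invariant for P ++ [x] and recurse
    have hinv' : ∀ y ∈ P ++ [x],
        (pvG seats floor nrows ncols dr dc t x).getD y none =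
          pvScanA seats floor nrows ncols dr dc ((nrows + ncols).toNat + 1) y.1 y.2 := by
      intro y hyx
      rcases List.mem_append.mp hyx with hyP | hyx
      · have hne : y ≠ x := pvLt_ne (hPx y hyP)
        unfold pvG
        rw [PySem.Dict.getD_insert_of_ne _ _ _ hne]
        exact hinv y hyP
      · rcases List.mem_singleton.mp hyx with rfl
        exact hval
    have := ih (P ++ [x]) (pvG seats floor nrows ncols dr dc t x)
      (by rw [hsplit]; simp) hinv' y (by simpa using hy)
    simpa using this

lemma pvSweep_getD (seats : List String) (floor : Bool) (nrows ncols dr dc : Int)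
    (hdr : dr = 1 ∨ dr = 0 ∨ dr = -1) (hdc : dc = 1 ∨ dc = 0 ∨ dc = -1)
    (hnz : ¬(dr = 0 ∧ dc = 0)) (x : Int × Int)
    (hx : 0 ≤ x.1 ∧ x.1 < nrows ∧ 0 ≤ x.2 ∧ x.2 < ncols) :
    (pvSweep seats floor nrows ncols dr dc).getD x none =
      pvScanA seats floor nrows ncols dr dc ((nrows + ncols).toNat + 1) x.1 x.2 := by
  rw [pvSweep_eq_foldl]
  exact pvFold_inv seats floor nrows ncols dr dc hdr hdc hnz
    (pvCells nrows ncols dr dc) [] PySem.Dict.empty rfl (by simp) x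
    (by simpa using (pvCells_mem nrows ncols dr dc x).mpr hx)

lemma pvDirs_cases : ∀ dir ∈ pvDirs,
    (dir.1 = 1 ∨ dir.1 = 0 ∨ dir.1 = -1) ∧ (dir.2 = 1 ∨ dir.2 = 0 ∨ dir.2 = -1) ∧
      ¬(dir.1 = 0 ∧ dir.2 = 0) := by decide

theorem pv_main (seats : List String) (floor : Bool) :
    build_neighbours_dict seats floor = build_neighbours_dict_alt seats floor := by
  unfold build_neighbours_dict build_neighbours_dict_alt
  simp only []
  refine congrArg (fun d : PySem.Dict (Int × Int) (PySem.Set (Int × Int)) =>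
    d.items.map (fun p => (p.1.1, p.1.2, p.2))) ?_
  rw [List.foldl_flatMap]
  apply PySem.List.foldl_congr_mem
  intro acc row hrow
  rw [List.foldl_flatMap]
  apply PySem.List.foldl_congr_mem
  intro acc2 col hcol
  by_cases hfl : pvCell seats row col = '.'
  · simp [hfl]
  · simp only [hfl, if_false]
    rw [List.filterMap_map, List.foldl_filterMap]
    apply PySem.List.foldl_congr_mem
    intro acc3 dir hdir
    obtain ⟨h1, h2, h3⟩ := pvDirs_cases dir hdir
    have hrow' := PySem.List.mem_pyRange_one.mp hrow
    have hcol' := PySem.List.mem_pyRange_one.mp hcol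
    have hsw := pvSweep_getD seats floor (seats.length : Int)
      (PySem.Str.len (PySem.List.pyGetD seats 0 "")) dir.1 dir.2 h1 h2 h3 (row, col)
      ⟨hrow'.1, hrow'.2, hcol'.1, hcol'.2⟩
    simp only [Function.comp, hsw]
    cases pvScanA seats floor (seats.length : Int)
        (PySem.Str.len (PySem.List.pyGetD seats 0 ""))
        dir.1 dir.2 (((seats.length : Int) + PySem.Str.len (PySem.List.pyGetD seats 0 "")).toNat + 1)
        row col with
    | none => simp [Option.map]
    | some k => simp [Option.map]

-- ===== VERDICT (by name: the statement is the Claim_ definition above) =====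
theorem build_neighbours_dict_spec : Claim_equal_build_neighbours_dict := by
  intro seats floor _ _
  unfold Spec_build_neighbours_dict
  exact pv_main seats floor
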